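-- pv_equiv track=rewrite | github.com/youssefhage/ahtrading-erp-pos | scripts/audit_erpnext_import_cloud.py | _header_first_index
-- ===== SOURCE A (Python) =====
-- def _header_first_index(header: list[str]) -> dict[str, int]:
--     idx: dict[str, int] = {}
--     for i, h in enumerate(header):
--         k = (h or "").strip()
--         if not k or k in idx:
--             continue
--         idx[k] = i
--     return idx
-- ===== SOURCE B (Python) =====
-- def _header_first_index(header: list[str]) -> dict[str, int]:
--     ks = [(h or "").strip() for h in header]
--     first = {k: i for i, k in reversed(list(enumerate(ks)))}
--     return {k: first[k] for k in ks if k}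
-- ===== Notes on version B (the rewrite author's own statement) =====
-- stated objective: alternative
-- what changed: Replaces A's single loop with its counter and membership-guarded insertion by two dict comprehensions over a pre-stripped list: a reverse-order comprehension whose unconditional overwrites leave each key at its first index, then a forward comprehension that reads those values and restores first-occurrence key order; no 'k in idx' test is maintained.
import Mathlib
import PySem

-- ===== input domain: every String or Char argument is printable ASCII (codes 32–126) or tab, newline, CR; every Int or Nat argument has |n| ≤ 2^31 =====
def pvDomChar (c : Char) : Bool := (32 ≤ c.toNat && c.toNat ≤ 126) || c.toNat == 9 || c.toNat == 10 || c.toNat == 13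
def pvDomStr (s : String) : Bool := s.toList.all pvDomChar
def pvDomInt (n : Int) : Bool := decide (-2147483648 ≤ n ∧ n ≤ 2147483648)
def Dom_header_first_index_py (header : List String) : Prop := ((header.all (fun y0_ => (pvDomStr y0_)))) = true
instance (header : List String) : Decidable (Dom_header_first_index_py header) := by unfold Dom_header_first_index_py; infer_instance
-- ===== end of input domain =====

-- B replaces A's counter loop with membership guard by two dict comprehensions over
-- the pre-stripped list: reverse-order overwrites leave each key at its first index,
-- then a forward pass restores first-occurrence key order; objective: alternative.

-- ===== PORT A =====
-- note: '(h or "")' is 'h' for a string argument (the empty string is falsy and 'or' returns "")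
def header_first_index_py (header : List String) : List (String × Int) :=
  ((PySem.List.enumerate header 0).foldl
    (fun idx p =>
      let k := PySem.Str.strip p.2
      if k = "" ∨ idx.contains k then idx else idx.insert k p.1)
    PySem.Dict.empty).items

-- ===== PORT B =====
-- each dict comprehension = left fold inserting; 'first[k]' is first.get? (the
-- 'none' branch is unreachable: k is drawn from ks, so it is a key of first)
def header_first_index_py_alt (header : List String) : List (String × Int) :=
  let ks := header.map PySem.Str.strip
  let first := ((PySem.List.enumerate ks 0).reverse).foldl
    (fun d p => d.insert p.2 p.1) (PySem.Dict.empty : PySem.Dict String Int)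
  (ks.foldl
    (fun idx k =>
      if k = "" then idx
      else
        match first.get? k with
        | some i => idx.insert k i
        | none => idx)
    PySem.Dict.empty).items

-- ===== PRECONDITION & SPEC =====
def Spec_header_first_index_py (header : List String) (out : List (String × Int)) : Prop := out = header_first_index_py_alt header
instance (header : List String) (out : List (String × Int)) : Decidable (Spec_header_first_index_py header out) := by unfold Spec_header_first_index_py; infer_instance

-- ===== CLAIM (what is proved, stated in full; the proofs are below) =====
def Claim_equal_header_first_index_py : Prop := ∀ (header : List String), Dom_header_first_index_py header → Spec_header_first_index_py header (header_first_index_py header)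

-- ===== LEMMAS AND PROOFS =====

-- inserting a pair the dict already holds is a no-op
lemma insert_of_get?_eq_some (d : PySem.Dict String Int) (k : String) (v : Int)
    (hnd : d.keys.Nodup) (h : d.get? k = some v) : d.insert k v = d := by
  apply PySem.Dict.ext
  rw [PySem.Dict.items_insert_of_contains d v (by
    rw [PySem.Dict.contains_eq_isSome_get?, h]; rfl)]
  conv_rhs => rw [← List.map_id d.items]
  apply List.map_congr_left
  rintro ⟨p1, p2⟩ hp
  by_cases hpk : p1 == k
  · have hk : p1 = k := by simpa using hpk
    have hg : d.get? p1 = some p2 := PySem.Dict.get?_of_mem_items d hp hnd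
    rw [hk, h] at hg
    simp [hk, Option.some_inj.mp hg]
  · simp [hpk]

-- A's loop body over the stripped list only
lemma foldA_map_strip (s : List String) : ∀ (i : Int) (d : PySem.Dict String Int),
    (PySem.List.enumerate s i).foldl
      (fun idx p =>
        let k := PySem.Str.strip p.2
        if k = "" ∨ idx.contains k then idx else idx.insert k p.1) d
    = (PySem.List.enumerate (s.map PySem.Str.strip) i).foldl
      (fun idx p => if p.2 = "" ∨ idx.contains p.2 then idx else idx.insert p.2 p.1) d := by
  induction s with
  | nil => intro i d; simp [PySem.List.enumerate_nil]
  | cons h t ih =>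
    intro i d
    simp only [List.map_cons, PySem.List.enumerate_cons, List.foldl_cons]
    exact ih (i + 1) _

-- main invariant: from a state holding exactly the nonempty keys of the processed
-- prefix, each mapped to its first index in the full list, the two loops coincide
lemma go_eq (ks0 : List String) : ∀ (s pre : List String) (d : PySem.Dict String Int),
    ks0 = pre ++ s →
    d.keys.Nodup →
    (∀ k, d.contains k = true ↔ (k ≠ "" ∧ k ∈ pre)) →
    (∀ k v, d.get? k = some v → PySem.List.index? ks0 k = some v.toNat ∧ ((v.toNat : Int) = v)) →
    (PySem.List.enumerate s (pre.length : Int)).foldl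
      (fun idx p => if p.2 = "" ∨ idx.contains p.2 then idx else idx.insert p.2 p.1) d
    = s.foldl
      (fun idx k =>
        if k = "" then idx
        else
          match PySem.List.index? ks0 k with
          | some i => idx.insert k (i : Int)
          | none => idx) d := by
  intro s
  induction s with
  | nil => intro pre d _ _ _ _; simp [PySem.List.enumerate_nil]
  | cons k t ih =>
    intro pre d hks hnd hcont hget
    rw [PySem.List.enumerate_cons, List.foldl_cons, List.foldl_cons]
    have hlen : ((pre ++ [k]).length : Int) = (pre.length : Int) + 1 := by
      simp [List.length_append]
    by_cases hk0 : k = ""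
    · -- empty key: both skip
      rw [if_pos (Or.inl hk0), if_pos hk0]
      have hcont' : ∀ k', d.contains k' = true ↔ (k' ≠ "" ∧ k' ∈ pre ++ [k]) := by
        intro k'; rw [hcont k']; subst hk0
        constructor
        · rintro ⟨h1, h2⟩; exact ⟨h1, by simp [h2]⟩
        · rintro ⟨h1, h2⟩
          rcases List.mem_append.mp h2 with h | h
          · exact ⟨h1, h⟩
          · simp at h; exact absurd h h1
      have := ih (pre ++ [k]) d (by simpa [hk0] using hks) hnd hcont' hget
      rwa [hlen] at this
    · by_cases hc : d.contains k = true
      · -- duplicate key: A skips, B re-inserts the identical pair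
        obtain ⟨v, hv⟩ : ∃ v, d.get? k = some v := by
          have hs : (d.get? k).isSome := by
            rw [← PySem.Dict.contains_eq_isSome_get? d k]; exact hc
          exact Option.isSome_iff_exists.mp hs
        obtain ⟨hidx, hcast⟩ := hget k v hv
        have hins : d.insert k ((v.toNat : Int)) = d := by
          rw [hcast]; exact insert_of_get?_eq_some d k v hnd hv
        rw [if_pos (Or.inr hc)]
        simp only [if_neg hk0, hidx, hins]
        have hmem : k ∈ pre := ((hcont k).mp hc).2
        have hcont' : ∀ k', d.contains k' = true ↔ (k' ≠ "" ∧ k' ∈ pre ++ [k]) := by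
          intro k'; rw [hcont k']
          constructor
          · rintro ⟨h1, h2⟩; exact ⟨h1, by simp [h2]⟩
          · rintro ⟨h1, h2⟩
            rcases List.mem_append.mp h2 with h | h
            · exact ⟨h1, h⟩
            · simp at h; subst h; exact ⟨h1, hmem⟩
        have := ih (pre ++ [k]) d (by simpa using hks) hnd hcont' hget
        rwa [hlen] at this
      · -- fresh key: both insert (k, pre.length)
        have hnpre : k ∉ pre := fun hm => hc ((hcont k).mpr ⟨hk0, hm⟩)
        have hidx : PySem.List.index? ks0 k = some pre.length :=
          (PySem.List.index?_eq_some_iff ks0 k pre.length).mpr ⟨pre, t, hks, rfl, hnpre⟩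
        rw [if_neg (by simp [hk0, hc])]
        simp only [if_neg hk0, hidx]
        set d' := d.insert k (pre.length : Int) with hd'
        have hnd' : d'.keys.Nodup := PySem.Dict.nodup_keys_insert d _ _ hnd
        have hcont' : ∀ k', d'.contains k' = true ↔ (k' ≠ "" ∧ k' ∈ pre ++ [k]) := by
          intro k'
          rw [hd', PySem.Dict.contains_insert, Bool.or_eq_true, beq_iff_eq, hcont k']
          constructor
          · rintro (h | ⟨h1, h2⟩)
            · subst h; exact ⟨hk0, by simp⟩
            · exact ⟨h1, by simp [h2]⟩
          · rintro ⟨h1, h2⟩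
            rcases List.mem_append.mp h2 with h | h
            · exact Or.inr ⟨h1, h⟩
            · simp at h; exact Or.inl h
        have hget' : ∀ k' v, d'.get? k' = some v →
            PySem.List.index? ks0 k' = some v.toNat ∧ ((v.toNat : Int) = v) := by
          intro k' v hgv
          rw [hd', PySem.Dict.get?_insert] at hgv
          split_ifs at hgv with he
          · subst he
            have hv : v = (pre.length : Int) := (Option.some_inj.mp hgv).symm
            subst hv
            refine ⟨?_, by simp⟩
            rw [hidx, Int.toNat_natCast]
          · exact hget k' v hgv
        have := ih (pre ++ [k]) d' (by simpa using hks) hnd' hcont' hget'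
        rwa [hlen] at this

-- B's reverse-overwrite dict maps each key of ks to its FIRST index (shifted by the
-- enumeration start)
lemma firstGet (ks : List String) : ∀ (s : Int) (k : String),
    (((PySem.List.enumerate ks s).reverse).foldl
      (fun d p => d.insert p.2 p.1) (PySem.Dict.empty : PySem.Dict String Int)).get? k
    = Option.map (fun n : Nat => s + (n : Int)) (PySem.List.index? ks k) := by
  induction ks with
  | nil => intro s k; simp [PySem.List.enumerate_nil, PySem.Dict.get?_empty]
  | cons h t ih =>
    intro s k
    rw [PySem.List.enumerate_cons, List.reverse_cons, List.foldl_append, List.foldl_cons,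
      List.foldl_nil, PySem.Dict.get?_insert]
    by_cases hk : k = h
    · subst hk
      rw [if_pos rfl, PySem.List.index?_cons_self]
      simp
    · rw [if_neg hk, ih (s + 1) k, PySem.List.index?_cons_of_ne t (Ne.symm hk)]
      rcases hidx : PySem.List.index? t k with _ | n
      · rfl
      · simp only [Option.map_some, Option.some.injEq]
        push_cast
        ring

-- B's second fold agrees pointwise on members of ks with the index?-based fold go_eq targets
lemma foldB_bridge (ks : List String) :
    ks.foldl
      (fun idx k =>
        if k = "" then idx
        else
          match (((PySem.List.enumerate ks 0).reverse).foldl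
              (fun d p => d.insert p.2 p.1) (PySem.Dict.empty : PySem.Dict String Int)).get? k with
          | some i => idx.insert k i
          | none => idx)
      PySem.Dict.empty
    = ks.foldl
      (fun idx k =>
        if k = "" then idx
        else
          match PySem.List.index? ks k with
          | some i => idx.insert k (i : Int)
          | none => idx)
      PySem.Dict.empty := by
  apply PySem.List.foldl_congr_mem
  intro acc k hk
  by_cases hk0 : k = ""
  · rw [if_pos hk0, if_pos hk0]
  · rw [if_neg hk0, if_neg hk0, firstGet ks 0 k]
    obtain ⟨n, hn⟩ := Option.isSome_iff_exists.mp ((PySem.List.index?_isSome_iff ks k).mpr hk)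
    rw [hn]
    simp

-- ===== VERDICT (by name: the statement is the Claim_ definition above) =====
theorem header_first_index_py_spec : Claim_equal_header_first_index_py := by
  intro header _
  unfold Spec_header_first_index_py header_first_index_py header_first_index_py_alt
  rw [foldA_map_strip]
  congr 1
  rw [foldB_bridge (header.map PySem.Str.strip)]
  have := go_eq (header.map PySem.Str.strip) (header.map PySem.Str.strip) [] PySem.Dict.empty
    (by simp) (by simp [PySem.Dict.keys_empty]) (by simp [PySem.Dict.contains_empty])
    (by simp [PySem.Dict.get?_empty])
  simpa using this
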